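-- pv_equiv track=rewrite | github.com/GizawAAiT/Codeforces | C_Pacer.py | solve
-- ===== SOURCE A (Python) =====
-- def solve(n, m, requirements):
--     curr_bit, jump_count = 0, 0
--     for minute in range(m):
--         if (minute + 1) in requirements.keys() and requirements[minute + 1] == curr_bit:
--             continue
--         curr_bit += 1 if curr_bit == 0 else -1
--         jump_count += 1
--
--     return jump_count
-- ===== SOURCE B (Python) =====
-- def solve(n, m, requirements):
--     # Gap-skipping: between requirement minutes the bit toggles every minute,
--     # so add the gap length and flip parity in O(1) per requirement.
--     prev, bit, jumps = 0, 0, 0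
--     for t, v in sorted(((k, v) for k, v in requirements.items() if 1 <= k <= m),
--                        key=lambda kv: kv[0]):
--         gap = t - prev - 1
--         jumps += gap
--         if gap % 2 == 1:
--             bit = 1 - bit
--         if v != bit:
--             bit = 1 - bit
--             jumps += 1
--         prev = t
--     jumps += max(m - prev, 0)
--     return jumps
-- ===== Notes on version B (the rewrite author's own statement) =====
-- stated objective: alternative
-- what changed: A simulates every minute of range(m); B sorts the requirement minutes that fall in [1,m] and processes each whole gap between them in one step using the gap's length and parity, then adds the remaining tail.
import Mathlib
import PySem

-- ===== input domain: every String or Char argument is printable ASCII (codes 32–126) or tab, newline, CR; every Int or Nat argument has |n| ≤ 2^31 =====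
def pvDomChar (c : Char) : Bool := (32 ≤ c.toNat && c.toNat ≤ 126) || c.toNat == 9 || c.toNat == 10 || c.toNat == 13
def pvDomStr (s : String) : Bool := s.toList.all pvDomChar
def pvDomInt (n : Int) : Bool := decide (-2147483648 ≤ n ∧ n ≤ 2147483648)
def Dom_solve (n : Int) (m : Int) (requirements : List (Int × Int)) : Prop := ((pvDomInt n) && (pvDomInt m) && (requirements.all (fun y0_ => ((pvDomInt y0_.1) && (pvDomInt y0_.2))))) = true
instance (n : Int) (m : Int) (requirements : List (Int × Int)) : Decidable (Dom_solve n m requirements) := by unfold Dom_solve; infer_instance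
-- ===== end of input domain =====

-- B replaces A's minute-by-minute simulation by sorting the requirement minutes
-- and handling each whole gap between them in one step via its length and parity.

-- ===== PORT A =====
-- one minute of A's loop: skip if the requirement fixes the current bit, else toggle and count
def stepA (d : PySem.Dict Int Int) (st : Int × Int) (minute : Int) : Int × Int :=
  match d.get? (minute + 1) with
  | some v => if v = st.1 then st
              else ((if st.1 = 0 then st.1 + 1 else st.1 - 1), st.2 + 1)
  | none => ((if st.1 = 0 then st.1 + 1 else st.1 - 1), st.2 + 1)

def solve (n : Int) (m : Int) (requirements : List (Int × Int)) : Int :=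
  let d := PySem.Dict.ofList requirements
  ((PySem.List.pyRange 0 m 1).foldl (stepA d) (0, 0)).2

-- ===== PORT B =====
-- one requirement minute of B's loop: add the gap, flip by its parity, then handle the requirement
def stepB (st : Int × Int × Int) (kv : Int × Int) : Int × Int × Int :=
  let gap := kv.1 - st.1 - 1
  let jumps := st.2.2 + gap
  let bit := if PySem.Int.mod gap 2 = 1 then 1 - st.2.1 else st.2.1
  if ¬ (kv.2 = bit) then (kv.1, 1 - bit, jumps + 1) else (kv.1, bit, jumps)

def solve_alt (n : Int) (m : Int) (requirements : List (Int × Int)) : Int :=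
  let d := PySem.Dict.ofList requirements
  let evs := PySem.List.sorted (d.items.filter (fun kv => 1 ≤ kv.1 && kv.1 ≤ m)) (fun kv => kv.1) false
  let st := evs.foldl stepB (0, 0, 0)
  st.2.2 + max (m - st.1) 0

-- ===== PRECONDITION & SPEC =====
def Spec_solve (n : Int) (m : Int) (requirements : List (Int × Int)) (out : Int) : Prop := out = solve_alt n m requirements
instance (n : Int) (m : Int) (requirements : List (Int × Int)) (out : Int) : Decidable (Spec_solve n m requirements out) := by unfold Spec_solve; infer_instance

-- ===== CLAIM (what is proved, stated in full; the proofs are below) =====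
def Claim_equal_solve : Prop := ∀ (n : Int) (m : Int) (requirements : List (Int × Int)), Dom_solve n m requirements → Spec_solve n m requirements (solve n m requirements)

-- ===== LEMMAS AND PROOFS =====

-- A's loop over a span containing no requirement minutes: toggles every minute
lemma loopA_gap (d : PySem.Dict Int Int) :
    ∀ (k : Nat) (prev bit j c : Int), prev + k = c →
    (bit = 0 ∨ bit = 1) →
    (∀ t, prev < t → t ≤ c → d.get? t = none) →
    (PySem.List.pyRange prev c 1).foldl (stepA d) (bit, j)
      = ((if (k : Int) % 2 = 1 then 1 - bit else bit), j + k) := by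
  intro k
  induction k with
  | zero =>
    intro prev bit j c hc _ _
    rw [PySem.List.pyRange_one_eq_nil (by omega)]
    simp
  | succ k ih =>
    intro prev bit j c hc hbit hnone
    rw [PySem.List.pyRange_one_cons (by omega)]
    have h1 : d.get? (prev + 1) = none := hnone _ (by omega) (by omega)
    have hs : stepA d (bit, j) prev = (1 - bit, j + 1) := by
      unfold stepA
      rw [h1]
      rcases hbit with h | h <;> simp [h]
    rw [List.foldl_cons, hs,
      ih (prev + 1) (1 - bit) (j + 1) c (by omega) (by omega)
        (fun t h1 h2 => hnone t (by omega) h2)]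
    rcases hbit with h | h <;> subst h <;>
      rcases Int.emod_two_eq_zero_or_one (k : Int) with h2 | h2 <;>
      · have h3 : ((k : Int) + 1) % 2 = 1 - (k : Int) % 2 := by omega
        push_cast
        rw [h3, h2]
        norm_num
        ring

-- the heart: A's remaining simulation from minute `prev` equals B's fold over
-- the remaining sorted requirement minutes
lemma loopA_eq (d : PySem.Dict Int Int) (m : Int) :
    ∀ (evs : List (Int × Int)) (prev bit j : Int), prev ≤ m →
    (bit = 0 ∨ bit = 1) →
    evs.Pairwise (fun a b => a.1 < b.1) →
    (∀ kv ∈ evs, prev < kv.1 ∧ kv.1 ≤ m) →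
    (∀ t v, prev < t → t ≤ m → (d.get? t = some v ↔ (t, v) ∈ evs)) →
    ((PySem.List.pyRange prev m 1).foldl (stepA d) (bit, j)).2
      = (evs.foldl stepB (prev, bit, j)).2.2
        + max (m - (evs.foldl stepB (prev, bit, j)).1) 0 := by
  intro evs
  induction evs with
  | nil =>
    intro prev bit j hpm hbit _ _ hcorr
    have hnone : ∀ t, prev < t → t ≤ m → d.get? t = none := by
      intro t h1 h2
      cases hg : d.get? t with
      | none => rfl
      | some v => exact absurd ((hcorr t v h1 h2).mp hg) (by simp)
    rw [loopA_gap d (m - prev).toNat prev bit j m (by omega) hbit hnone]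
    simp only [List.foldl_nil]
    omega
  | cons hd tl ih =>
    intro prev bit j hpm hbit hpw hbound hcorr
    obtain ⟨t, v⟩ := hd
    have hrange : prev < t ∧ t ≤ m := hbound (t, v) (by simp)
    have hhd : ∀ kv ∈ tl, t < kv.1 := (List.pairwise_cons.mp hpw).1
    -- split the range at t-1 and t
    rw [PySem.List.pyRange_one_append prev (t - 1) m (by omega) (by omega),
        PySem.List.pyRange_one_cons (show t - 1 < m by omega),
        List.foldl_append, List.foldl_cons]
    -- gap segment: no requirement keys in (prev, t-1]
    have hnone : ∀ s, prev < s → s ≤ t - 1 → d.get? s = none := by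
      intro s h1 h2
      cases hg : d.get? s with
      | none => rfl
      | some w =>
        have := (hcorr s w h1 (by omega)).mp hg
        rcases List.mem_cons.mp this with he | hm
        · exact absurd (congrArg Prod.fst he) (by simp; omega)
        · exact absurd (hhd _ hm) (by omega)
    set g : Int := t - 1 - prev with hg
    rw [loopA_gap d g.toNat prev bit j (t - 1) (by omega) hbit hnone]
    set b1 : Int := if (g.toNat : Int) % 2 = 1 then 1 - bit else bit with hb1
    have hb1' : b1 = if PySem.Int.mod g 2 = 1 then 1 - bit else bit := by
      rw [hb1, PySem.Int.mod_eq_emod_of_pos (by omega : (0:Int) < 2),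
        Int.toNat_of_nonneg (show 0 ≤ g by omega)]
    have hb1mem : b1 = 0 ∨ b1 = 1 := by
      rw [hb1]; rcases hbit with h | h <;> subst h <;> split <;> simp
    -- the step at minute t-1 (key t)
    have hget : d.get? t = some v := (hcorr t v hrange.1 hrange.2).mpr (by simp)
    have hB : stepB (prev, bit, j) (t, v)
        = if v = b1 then (t, b1, j + g) else (t, 1 - b1, j + g + 1) := by
      unfold stepB
      have e1 : t - prev - 1 = g := by omega
      simp only [e1, ← hb1']
      by_cases hv : v = b1 <;> simp [hv]
    have htail : ∀ (bit' j' : Int), bit' = 0 ∨ bit' = 1 →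
        ((PySem.List.pyRange t m 1).foldl (stepA d) (bit', j')).2
          = (tl.foldl stepB (t, bit', j')).2.2
            + max (m - (tl.foldl stepB (t, bit', j')).1) 0 := by
      intro bit' j' hbit'
      apply ih t bit' j' hrange.2 hbit' (List.pairwise_cons.mp hpw).2
      · intro kv hkv; exact ⟨hhd kv hkv, (hbound kv (List.mem_cons_of_mem _ hkv)).2⟩
      · intro s w h1 h2
        rw [hcorr s w (by omega) h2]
        constructor
        · intro hm
          rcases List.mem_cons.mp hm with he | hm'
          · exact absurd (congrArg Prod.fst he) (by simp; omega)
          · exact hm'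
        · exact fun hm => List.mem_cons_of_mem _ hm
    rw [show t - 1 + 1 = t from by omega]
    by_cases hv : v = b1
    · -- no jump at t
      have hA : stepA d (b1, j + (g.toNat : Int)) (t - 1) = (b1, j + g.toNat) := by
        unfold stepA
        simp only [show t - 1 + 1 = t from by omega, hget]
        simp [hv]
      rw [hA, List.foldl_cons, hB, if_pos hv,
        show (j + (g.toNat : Int)) = j + g from by omega]
      exact htail b1 (j + g) hb1mem
    · -- jump at t
      have hA : stepA d (b1, j + (g.toNat : Int)) (t - 1)
          = (1 - b1, j + g.toNat + 1) := by
        unfold stepA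
        simp only [show t - 1 + 1 = t from by omega, hget]
        rcases hb1mem with h | h <;> simp [h] <;> omega
      rw [hA, List.foldl_cons, hB, if_neg hv,
        show (j + (g.toNat : Int) + 1) = j + g + 1 from by omega]
      exact htail (1 - b1) (j + g + 1) (by omega)

lemma pairwise_lt_of_le_nodup (l : List (Int × Int))
    (h1 : l.Pairwise (fun a b => a.1 ≤ b.1)) (h2 : (l.map Prod.fst).Nodup) :
    l.Pairwise (fun a b => a.1 < b.1) := by
  induction l with
  | nil => exact List.Pairwise.nil
  | cons a t ih =>
    rw [List.pairwise_cons] at h1 ⊢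
    simp only [List.map_cons, List.nodup_cons, List.mem_map] at h2
    exact ⟨fun b hb => lt_of_le_of_ne (h1.1 b hb)
        (fun he => h2.1 ⟨b, hb, he.symm⟩), ih h1.2 h2.2⟩

-- ===== VERDICT (by name: the statement is the Claim_ definition above) =====
theorem solve_spec : Claim_equal_solve := by
  unfold Claim_equal_solve Spec_solve solve solve_alt
  intro n m requirements _
  simp only
  set d := PySem.Dict.ofList requirements with hd
  by_cases hm : m < 0
  · have hf : d.items.filter (fun kv => 1 ≤ kv.1 && kv.1 ≤ m) = [] := by
      apply List.filter_eq_nil_iff.mpr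
      intro kv _
      simp only [Bool.and_eq_true, decide_eq_true_eq, not_and]
      omega
    rw [hf, PySem.List.pyRange_one_eq_nil (by omega)]
    have hs : PySem.List.sorted ([] : List (Int × Int)) (fun kv => kv.1) false = [] := by
      rw [PySem.List.sorted_eq_nil_iff]
    rw [hs]
    simp only [List.foldl_nil]
    omega
  · rw [not_lt] at hm
    set flt := d.items.filter (fun kv => 1 ≤ kv.1 && kv.1 ≤ m) with hflt
    set evs := PySem.List.sorted flt (fun kv => kv.1) false with hevs
    have hnk : d.keys.Nodup := PySem.Dict.nodup_keys_ofList requirements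
    have hperm : evs.Perm flt := PySem.List.sorted_perm flt (fun kv => kv.1) false
    have hfltnd : (flt.map Prod.fst).Nodup := by
      have hsub : (flt.map Prod.fst).Sublist (d.items.map Prod.fst) :=
        (List.filter_sublist (p := fun kv => 1 ≤ kv.1 && kv.1 ≤ m)).map Prod.fst
      exact hsub.nodup hnk
    have hevnd : (evs.map Prod.fst).Nodup := ((hperm.map Prod.fst).nodup_iff).mpr hfltnd
    have hpw : evs.Pairwise (fun a b => a.1 < b.1) :=
      pairwise_lt_of_le_nodup evs (PySem.List.sorted_pairwise flt (fun kv => kv.1)) hevnd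
    have hmem : ∀ kv : Int × Int, kv ∈ evs ↔ (kv ∈ d.items ∧ (1 ≤ kv.1 ∧ kv.1 ≤ m)) := by
      intro kv
      rw [PySem.List.mem_sorted, hflt, List.mem_filter]
      simp
    have hbound : ∀ kv ∈ evs, (0 : Int) < kv.1 ∧ kv.1 ≤ m := by
      intro kv hkv
      have := (hmem kv).mp hkv
      omega
    have hcorr : ∀ t v, (0 : Int) < t → t ≤ m → (d.get? t = some v ↔ (t, v) ∈ evs) := by
      intro t v h1 h2
      rw [PySem.Dict.get?_eq_some_iff_mem_items (d := d) (hnd := hnk), hmem]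
      constructor
      · intro h; exact ⟨h, by omega, h2⟩
      · exact fun h => h.1
    exact loopA_eq d m evs 0 0 0 hm (Or.inl rfl) hpw hbound hcorr
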